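-- pv_equiv track=rewrite | github.com/gorodtx/selection_translator_anki | tools/windows/vm/preflight_host.py | parse_lscpu_virtualization
-- ===== SOURCE A (Python) =====
-- def parse_lscpu_virtualization(text: str) -> tuple[bool, str]:
--     virtualization = ""
--     flags: set[str] = set()
--     for line in text.splitlines():
--         if ":" not in line:
--             continue
--         key, value = line.split(":", 1)
--         normalized_key = key.strip().lower()
--         normalized_value = value.strip()
--         if normalized_key == "virtualization":
--             virtualization = normalized_value
--         if normalized_key == "flags":
--             flags = set(normalized_value.split())
--     has_hw = bool(virtualization) or ("svm" in flags or "vmx" in flags)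
--     details = (
--         "Virtualization="
--         f"{virtualization or 'unknown'}, flags include svm/vmx={('svm' in flags) or ('vmx' in flags)}"
--     )
--     return (has_hw, details)
-- ===== SOURCE B (Python) =====
-- def parse_lscpu_virtualization(text: str) -> tuple[bool, str]:
--     def last_value(key: str) -> str:
--         # search lines back-to-front: the last matching line wins
--         for line in reversed(text.splitlines()):
--             if ":" in line:
--                 k, v = line.split(":", 1)
--                 if k.strip().lower() == key:
--                     return v.strip()
--         return ""
--
--     virtualization = last_value("virtualization")
--     flags = set(last_value("flags").split())
--     has_hw = bool(virtualization) or ("svm" in flags or "vmx" in flags)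
--     details = (
--         "Virtualization="
--         f"{virtualization or 'unknown'}, flags include svm/vmx={('svm' in flags) or ('vmx' in flags)}"
--     )
--     return (has_hw, details)
-- ===== Notes on version B (the rewrite author's own statement) =====
-- stated objective: alternative
-- what changed: B replaces A's single forward accumulator loop by two independent back-to-front searches: a query helper scans the reversed line list and returns the value of the last line whose normalized key matches, invoked once per key of interest.
import Mathlib
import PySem

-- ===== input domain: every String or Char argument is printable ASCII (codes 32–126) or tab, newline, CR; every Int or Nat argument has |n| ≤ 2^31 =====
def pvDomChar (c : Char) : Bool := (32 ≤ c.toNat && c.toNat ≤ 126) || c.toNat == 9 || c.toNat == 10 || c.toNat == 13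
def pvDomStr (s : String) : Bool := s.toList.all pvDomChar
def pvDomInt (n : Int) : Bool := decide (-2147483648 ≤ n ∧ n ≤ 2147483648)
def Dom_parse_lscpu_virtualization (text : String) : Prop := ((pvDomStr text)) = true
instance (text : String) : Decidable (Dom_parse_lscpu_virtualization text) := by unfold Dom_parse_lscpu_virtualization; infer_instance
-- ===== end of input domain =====

-- B replaces A's single forward accumulator loop by two independent back-to-front searches
-- (last matching line wins = first match in the reversed line list); objective: alternative.

-- shared tail of both Pythons: has_hw and the details string
def pvResult (virt : String) (flags : PySem.Set String) : Bool × String :=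
  let anyFlag := PySem.Set.contains flags "svm" || PySem.Set.contains flags "vmx"
  (((virt != "") || anyFlag),
   "Virtualization=" ++ (if virt == "" then "unknown" else virt) ++
     ", flags include svm/vmx=" ++ (if anyFlag then "True" else "False"))

-- ===== PORT A =====
-- A's per-line parsing: "if ':' not in line: continue; key, value = line.split(':', 1); …"
def pvParseLine (line : String) : Option (String × String) :=
  if PySem.Str.isIn ":" line then
    match (PySem.Str.splitMax? line ":" 1).getD [] with
    | key :: value :: _ =>
        some (PySem.Str.lower (PySem.Str.strip key), PySem.Str.strip value)
    | _ => none
  else none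

def parse_lscpu_virtualization (text : String) : Bool × String :=
  let st := (PySem.Str.splitlines text).foldl
    (fun (st : String × PySem.Set String) line =>
      match pvParseLine line with
      | none => st
      | some (k, v) =>
          let virt := if k == "virtualization" then v else st.1
          let fl := if k == "flags" then PySem.Set.ofList (PySem.Str.split₀ v) else st.2
          (virt, fl))
    ("", PySem.Set.empty)
  pvResult st.1 st.2

-- ===== PORT B =====
-- B's query helper: scan the reversed line list, return the first matching value, "" if none
def pvLastValue (key : String) : List String → String
  | [] => ""
  | line :: rest =>
      if PySem.Str.isIn ":" line then
        match (PySem.Str.splitMax? line ":" 1).getD [] with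
        | k :: v :: _ =>
            if PySem.Str.lower (PySem.Str.strip k) == key then PySem.Str.strip v
            else pvLastValue key rest
        | _ => pvLastValue key rest
      else pvLastValue key rest

def parse_lscpu_virtualization_alt (text : String) : Bool × String :=
  let revLines := (PySem.Str.splitlines text).reverse
  let virt := pvLastValue "virtualization" revLines
  let flags := PySem.Set.ofList (PySem.Str.split₀ (pvLastValue "flags" revLines))
  pvResult virt flags

-- ===== PRECONDITION & SPEC =====
def Spec_parse_lscpu_virtualization (text : String) (out : Bool × String) : Prop := out = parse_lscpu_virtualization_alt text
instance (text : String) (out : Bool × String) : Decidable (Spec_parse_lscpu_virtualization text out) := by unfold Spec_parse_lscpu_virtualization; infer_instance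

-- ===== CLAIM (what is proved, stated in full; the proofs are below) =====
def Claim_equal_parse_lscpu_virtualization : Prop := ∀ (text : String), Dom_parse_lscpu_virtualization text → Spec_parse_lscpu_virtualization text (parse_lscpu_virtualization text)

-- ===== LEMMAS AND PROOFS =====

-- proof-side view of B's search: first matching value as an Option
def pvFind? (key : String) : List String → Option String
  | [] => none
  | l :: r =>
      match pvParseLine l with
      | some (k, v) => if k == key then some v else pvFind? key r
      | none => pvFind? key r

theorem pvLastValue_eq_find (key : String) (xs : List String) :
    pvLastValue key xs = (pvFind? key xs).getD "" := by
  induction xs with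
  | nil => rfl
  | cons l r ih =>
      simp only [pvLastValue, pvFind?, pvParseLine]
      split
      · split
        · split <;> simp_all
        · exact ih
      · exact ih

theorem pvFind_append (key : String) (xs ys : List String) :
    pvFind? key (xs ++ ys) =
      (match pvFind? key xs with
       | some v => some v
       | none => pvFind? key ys) := by
  induction xs with
  | nil => simp [pvFind?]
  | cons l r ih =>
      simp only [List.cons_append, pvFind?]
      cases h : pvParseLine l with
      | none => exact ih
      | some kv =>
          obtain ⟨k, v⟩ := kv
          by_cases hk : (k == key) = true <;> simp [hk, ih]

-- loop invariant: A's forward accumulator equals B's back-to-front first match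
theorem pv_inv (lines : List String) (v0 : String) (f0 : PySem.Set String) :
    lines.foldl
      (fun (st : String × PySem.Set String) line =>
        match pvParseLine line with
        | none => st
        | some (k, v) =>
            let virt := if k == "virtualization" then v else st.1
            let fl := if k == "flags" then PySem.Set.ofList (PySem.Str.split₀ v) else st.2
            (virt, fl))
      (v0, f0) =
    ((pvFind? "virtualization" lines.reverse).getD v0,
     match pvFind? "flags" lines.reverse with
     | some v => PySem.Set.ofList (PySem.Str.split₀ v)
     | none => f0) := by
  induction lines generalizing v0 f0 with
  | nil => rfl
  | cons line rest ih =>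
      simp only [List.foldl_cons, List.reverse_cons]
      rw [pvFind_append "virtualization" rest.reverse [line],
          pvFind_append "flags" rest.reverse [line]]
      cases h : pvParseLine line with
      | none =>
          rw [ih v0 f0]
          cases hv : pvFind? "virtualization" rest.reverse <;>
          cases hf : pvFind? "flags" rest.reverse <;>
            simp [pvFind?, h]
      | some kv =>
          obtain ⟨k, v⟩ := kv
          rw [ih _ _]
          cases hv : pvFind? "virtualization" rest.reverse <;>
          cases hf : pvFind? "flags" rest.reverse <;>
            by_cases hk1 : (k == "virtualization") = true <;>
            by_cases hk2 : (k == "flags") = true <;>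
              simp [pvFind?, h, hk1, hk2]

-- ===== VERDICT (by name: the statement is the Claim_ definition above) =====
theorem parse_lscpu_virtualization_spec : Claim_equal_parse_lscpu_virtualization := by
  intro text _
  unfold Spec_parse_lscpu_virtualization parse_lscpu_virtualization parse_lscpu_virtualization_alt
  rw [pv_inv]
  simp only [pvLastValue_eq_find]
  cases hf : pvFind? "flags" (PySem.Str.splitlines text).reverse <;> simp
  rfl
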